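-- pv_equiv track=rewrite | github.com/trinahaque/CodeSignal | CornerBits/arrayPacking.py | arrayPacking
-- ===== SOURCE A (Python) =====
-- def arrayPacking(a):
--     if(1 <= len(a) and len(a) <= 4):
--         result = 0
--         for i in range(0, len(a)):
--             if(a[i]>256 or a[i]<0):
--                 return
--             else:
--                 result += a[i] << 8 * i
--         return result
-- ===== SOURCE B (Python) =====
-- def arrayPacking(a):
--     if not (1 <= len(a) <= 4):
--         return None
--     if any(x > 256 or x < 0 for x in a):
--         return None
--     acc = 0
--     for x in reversed(a):
--         acc = (acc << 8) + x
--     return acc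
-- ===== Notes on version B (the rewrite author's own statement) =====
-- stated objective: alternative
-- what changed: Replaces A's forward position-indexed shift accumulation (x << 8*i inside a validating loop) with a separate validation pass followed by a Horner-style right-to-left fold over reversed(a).
import Mathlib
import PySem

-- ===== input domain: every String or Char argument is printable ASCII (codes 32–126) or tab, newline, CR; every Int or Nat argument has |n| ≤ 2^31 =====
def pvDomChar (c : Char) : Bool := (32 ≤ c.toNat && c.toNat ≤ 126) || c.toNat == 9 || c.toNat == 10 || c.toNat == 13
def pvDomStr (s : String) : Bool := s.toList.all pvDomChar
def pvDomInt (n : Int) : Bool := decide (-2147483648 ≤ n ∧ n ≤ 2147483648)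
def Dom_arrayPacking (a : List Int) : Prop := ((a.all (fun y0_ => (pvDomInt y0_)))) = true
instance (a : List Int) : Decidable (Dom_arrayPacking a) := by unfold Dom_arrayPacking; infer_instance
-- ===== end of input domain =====

-- B replaces A's forward position-indexed shift loop with validate-then-Horner-fold over the
-- reversed list (alternative decomposition, same cost).

-- ===== PORT A =====
-- the for-loop of A: walks the list carrying the position i and the running result;
-- returns none at the first element with a[i] > 256 or a[i] < 0 (Python's bare `return`)
def arrayPackingLoopA : List Int → Nat → Int → Option Int
  | [], _, result => some result
  | x :: rest, i, result =>
    if x > 256 ∨ x < 0 then none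
    else arrayPackingLoopA rest (i + 1) (result + x * 2 ^ (8 * i))

def arrayPacking (a : List Int) : Option Int :=
  if 1 ≤ a.length ∧ a.length ≤ 4 then arrayPackingLoopA a 0 0
  else none

-- ===== PORT B =====
def arrayPacking_alt (a : List Int) : Option Int :=
  if ¬ (1 ≤ a.length ∧ a.length ≤ 4) then none
  else if a.any (fun x => decide (x > 256) || decide (x < 0)) then none
  else some (a.reverse.foldl (fun acc x => acc * 2 ^ 8 + x) 0)

-- ===== PRECONDITION & SPEC =====
def Spec_arrayPacking (a : List Int) (out : Option Int) : Prop := out = arrayPacking_alt a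
instance (a : List Int) (out : Option Int) : Decidable (Spec_arrayPacking a out) := by unfold Spec_arrayPacking; infer_instance

-- ===== CLAIM (what is proved, stated in full; the proofs are below) =====
def Claim_equal_arrayPacking : Prop := ∀ (a : List Int), Dom_arrayPacking a → Spec_arrayPacking a (arrayPacking a)

-- ===== LEMMAS AND PROOFS =====

-- B's Horner fold, seen structurally (reverse.foldl = foldr of the flipped step)
def hornerB (l : List Int) : Int := l.foldr (fun x acc => acc * 2 ^ 8 + x) 0

theorem hornerB_eq_foldl (l : List Int) :
    l.reverse.foldl (fun acc x => acc * 2 ^ 8 + x) 0 = hornerB l := by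
  simp [hornerB, List.foldl_reverse]

-- characterisation of A's loop: none iff some element is out of range, else the scaled Horner value
theorem loopA_eq (l : List Int) : ∀ (i : Nat) (r : Int),
    arrayPackingLoopA l i r =
      if l.any (fun x => decide (x > 256) || decide (x < 0)) then none
      else some (r + 2 ^ (8 * i) * hornerB l) := by
  induction l with
  | nil => intro i r; simp [arrayPackingLoopA, hornerB]
  | cons x rest ih =>
    intro i r
    simp only [arrayPackingLoopA, List.any_cons, hornerB, List.foldr_cons]
    by_cases hx : x > 256 ∨ x < 0
    · have hxb : (decide (x > 256) || decide (x < 0)) = true := by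
        simp only [Bool.or_eq_true, decide_eq_true_eq]; tauto
      simp [hx, hxb]
    · rw [if_neg hx, ih (i + 1) (r + x * 2 ^ (8 * i))]
      have hxb : (decide (x > 256) || decide (x < 0)) = false := by
        simp only [Bool.or_eq_false_iff, decide_eq_false_iff_not]; tauto
      simp only [hxb, Bool.false_or]
      split_ifs with h
      · rfl
      · have : (2 : Int) ^ (8 * (i + 1)) = 2 ^ (8 * i) * 2 ^ 8 := by
          rw [← pow_add]; ring_nf
        rw [this]
        congr 1
        unfold hornerB
        ring

-- ===== VERDICT (by name: the statement is the Claim_ definition above) =====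
theorem arrayPacking_spec : Claim_equal_arrayPacking := by
  intro a _
  unfold Spec_arrayPacking arrayPacking arrayPacking_alt
  by_cases hlen : 1 ≤ a.length ∧ a.length ≤ 4
  · rw [if_pos hlen, if_neg (not_not_intro hlen), loopA_eq, hornerB_eq_foldl]
    split_ifs with h
    · rfl
    · simp
  · rw [if_neg hlen, if_pos hlen]
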